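-- pv_equiv track=rewrite | github.com/ccczzzmmm666/sr_project1 | project1_code/graphics/graphic13.py | calculate_data_amount
-- ===== SOURCE A (Python) =====
-- def calculate_data_amount(rename_operations, stat_operations):
--     data_amounts = []
--     for pid, time, old_path, new_path in rename_operations:
--         # 找到与old_path匹配的文件大小
--         file_size = None
--         for stat_pid, stat_time, syscall, file_path, size in stat_operations:
--             if file_path == old_path and stat_pid == pid:
--                 file_size = size
--                 break
--
--         if file_size is not None:
--             data_amounts.append((pid, time, old_path, new_path, file_size))
--
--     return data_amounts
-- ===== SOURCE B (Python) =====
-- def calculate_data_amount(rename_operations, stat_operations):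
--     # Invert the loop: index rename ops by (pid, old_path), then ONE pass over
--     # stat_operations fills a slot per rename at its FIRST matching stat
--     # (pop ensures later stats with the same key are ignored); finally compact.
--     want = {}
--     for i, (pid, time, old_path, new_path) in enumerate(rename_operations):
--         want.setdefault((pid, old_path), []).append(i)
--     slots = [None] * len(rename_operations)
--     for stat_pid, stat_time, syscall, file_path, size in stat_operations:
--         idxs = want.pop((stat_pid, file_path), None)
--         if idxs is not None:
--             for i in idxs:
--                 slots[i] = size
--     return [(pid, time, old_path, new_path, slots[i])
--             for i, (pid, time, old_path, new_path) in enumerate(rename_operations)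
--             if slots[i] is not None]
-- ===== Notes on version B (the rewrite author's own statement) =====
-- stated objective: faster
-- what changed: Inverts the loop structure: instead of scanning stat_operations once per rename, B indexes rename positions by (pid, old_path), makes one stat-driven pass that pops each key at its first matching stat and writes the size into positional slots, then compacts the slots in rename order.
import Mathlib
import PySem

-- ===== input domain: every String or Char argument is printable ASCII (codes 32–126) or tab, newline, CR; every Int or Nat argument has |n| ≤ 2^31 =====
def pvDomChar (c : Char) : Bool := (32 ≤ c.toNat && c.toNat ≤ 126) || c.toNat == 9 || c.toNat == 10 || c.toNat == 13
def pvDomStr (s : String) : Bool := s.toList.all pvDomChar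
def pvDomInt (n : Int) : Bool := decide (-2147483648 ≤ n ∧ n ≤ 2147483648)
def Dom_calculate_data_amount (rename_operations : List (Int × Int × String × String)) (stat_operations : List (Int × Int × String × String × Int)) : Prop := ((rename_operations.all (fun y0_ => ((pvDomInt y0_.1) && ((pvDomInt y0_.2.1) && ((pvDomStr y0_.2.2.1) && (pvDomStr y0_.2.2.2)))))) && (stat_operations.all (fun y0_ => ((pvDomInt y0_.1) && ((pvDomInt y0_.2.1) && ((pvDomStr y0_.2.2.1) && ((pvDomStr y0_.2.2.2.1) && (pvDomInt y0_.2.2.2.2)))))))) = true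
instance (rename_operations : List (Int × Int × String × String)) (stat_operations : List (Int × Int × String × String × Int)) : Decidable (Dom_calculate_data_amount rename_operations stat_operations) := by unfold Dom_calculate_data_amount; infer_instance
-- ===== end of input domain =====

-- B inverts the loop structure: rename positions indexed by (pid, old_path), one stat-driven pass
-- fills positional slots at each key's first matching stat, then a compaction pass (objective: faster).

-- ===== PORT A =====
-- inner loop of A: first stat entry whose file_path and pid match, returning its size
def pvAFind (pid : Int) (old_path : String) : List (Int × Int × String × String × Int) → Option Int
  | [] => none
  | (stat_pid, _, _, file_path, size) :: rest =>
    if file_path == old_path && stat_pid == pid then some size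
    else pvAFind pid old_path rest

def calculate_data_amount (rename_operations : List (Int × Int × String × String)) (stat_operations : List (Int × Int × String × String × Int)) : List (Int × Int × String × String × Int) :=
  rename_operations.foldl
    (fun data_amounts t =>
      match t with
      | (pid, time, old_path, new_path) =>
        match pvAFind pid old_path stat_operations with
        | some file_size => data_amounts ++ [(pid, time, old_path, new_path, file_size)]
        | none => data_amounts)
    []

-- ===== PORT B =====
-- first pass of B: want.setdefault((pid, old_path), []).append(i)  =  modify key [] (· ++ [i])
def pvBWant (rename_operations : List (Int × Int × String × String)) : PySem.Dict (Int × String) (List Int) :=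
  (PySem.List.enumerate rename_operations 0).foldl
    (fun want p =>
      match p with
      | (i, (pid, _, old_path, _)) => want.modify (pid, old_path) [] (· ++ [i]))
    PySem.Dict.empty

-- second pass of B: idxs = want.pop(key, None); if found, slots[i] = size for each i.
-- the indices i come from enumerate, so they are nonnegative and < len(slots): '.set i.toNat' is exact there
def pvBFill : List (Int × Int × String × String × Int) → List (Option Int) → PySem.Dict (Int × String) (List Int) → List (Option Int) × PySem.Dict (Int × String) (List Int)
  | [], slots, want => (slots, want)
  | (stat_pid, _, _, file_path, size) :: rest, slots, want =>
    match want.get? (stat_pid, file_path) with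
    | some idxs => pvBFill rest (idxs.foldl (fun sl i => sl.set i.toNat (some size)) slots) (want.erase (stat_pid, file_path))
    | none => pvBFill rest slots want

def calculate_data_amount_alt (rename_operations : List (Int × Int × String × String)) (stat_operations : List (Int × Int × String × String × Int)) : List (Int × Int × String × String × Int) :=
  let want := pvBWant rename_operations
  let slots := (pvBFill stat_operations (List.replicate rename_operations.length none) want).1
  -- final comprehension: slots[i] is read with pyGetD (i is always in range, the default is never used)
  (PySem.List.enumerate rename_operations 0).foldl
    (fun acc p =>
      match p with
      | (i, (pid, time, old_path, new_path)) =>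
        match PySem.List.pyGetD slots i none with
        | some size => acc ++ [(pid, time, old_path, new_path, size)]
        | none => acc)
    []

-- ===== PRECONDITION & SPEC =====
def Spec_calculate_data_amount (rename_operations : List (Int × Int × String × String)) (stat_operations : List (Int × Int × String × String × Int)) (out : List (Int × Int × String × String × Int)) : Prop := out = calculate_data_amount_alt rename_operations stat_operations
instance (rename_operations : List (Int × Int × String × String)) (stat_operations : List (Int × Int × String × String × Int)) (out : List (Int × Int × String × String × Int)) : Decidable (Spec_calculate_data_amount rename_operations stat_operations out) := by unfold Spec_calculate_data_amount; infer_instance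

-- ===== CLAIM (what is proved, stated in full; the proofs are below) =====
def Claim_equal_calculate_data_amount : Prop := ∀ (rename_operations : List (Int × Int × String × String)) (stat_operations : List (Int × Int × String × String × Int)), Dom_calculate_data_amount rename_operations stat_operations → Spec_calculate_data_amount rename_operations stat_operations (calculate_data_amount rename_operations stat_operations)

-- ===== LEMMAS AND PROOFS =====

-- Dict.erase lookup facts (not in the PySem lemma book)
lemma pvGet?_erase_self {κ ν : Type} [BEq κ] [LawfulBEq κ] (d : PySem.Dict κ ν) (k : κ) :
    (d.erase k).get? k = none := by
  simp [PySem.Dict.erase, PySem.Dict.get?, List.find?_eq_none]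

lemma pvGet?_erase_of_ne {κ ν : Type} [BEq κ] [LawfulBEq κ] (d : PySem.Dict κ ν) (k k' : κ)
    (h : k' ≠ k) : (d.erase k).get? k' = d.get? k' := by
  obtain ⟨items⟩ := d
  simp only [PySem.Dict.erase, PySem.Dict.get?]
  induction items with
  | nil => rfl
  | cons a rest ih =>
    by_cases ha : a.1 == k'
    · have hak : (a.1 == k) = false := by simp at ha; simp [ha, h]
      simp [hak, ha]
    · by_cases hak : a.1 == k
      · simpa [hak, ha] using ih
      · simpa [hak, ha] using ih

lemma pvGetD_erase_self {κ ν : Type} [BEq κ] [LawfulBEq κ] (d : PySem.Dict κ (List ν)) (k : κ) :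
    (d.erase k).getD k [] = [] := by
  simp [PySem.Dict.getD_eq_get?_getD, pvGet?_erase_self]

lemma pvGetD_erase_of_ne {κ ν : Type} [BEq κ] [LawfulBEq κ] (d : PySem.Dict κ (List ν)) (k k' : κ)
    (h : k' ≠ k) : (d.erase k).getD k' [] = d.getD k' [] := by
  simp [PySem.Dict.getD_eq_get?_getD, pvGet?_erase_of_ne d k k' h]

-- membership in any value list of the erased dict implies membership before the erase
lemma pvMem_getD_erase {κ ν : Type} [BEq κ] [LawfulBEq κ] [DecidableEq κ]
    (d : PySem.Dict κ (List ν)) (k k' : κ) (j : ν) (hj : j ∈ (d.erase k).getD k' []) :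
    j ∈ d.getD k' [] := by
  by_cases hkk : k' = k
  · subst hkk; rw [pvGetD_erase_self] at hj; simp at hj
  · rwa [pvGetD_erase_of_ne d k k' hkk] at hj

-- the inner write loop of B's stat pass: effect on one cell
lemma pvSetMany_getElem? (idxs : List Int) (sz : Int) (l : List (Option Int)) (m : Nat)
    (hpos : ∀ j ∈ idxs, 0 ≤ j) :
    (idxs.foldl (fun sl i => sl.set i.toNat (some sz)) l)[m]? =
      if (m : Int) ∈ idxs ∧ m < l.length then some (some sz) else l[m]? := by
  induction idxs generalizing l with
  | nil => simp
  | cons j rest ih =>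
    have hj : 0 ≤ j := hpos j List.mem_cons_self
    rw [List.foldl_cons, ih (l.set j.toNat (some sz)) (fun x hx => hpos x (List.mem_cons_of_mem _ hx))]
    by_cases hjm : j = (m : Int)
    · subst hjm
      simp only [Int.toNat_natCast, List.length_set, List.mem_cons, true_or, true_and]
      by_cases hlt : m < l.length
      · have hset := List.getElem?_set_self (l := l) (a := some sz) hlt
        split_ifs <;> simp_all
      · have h1 : l[m]? = none := by rw [List.getElem?_eq_none]; omega
        have h2 : (l.set (↑m : Int).toNat (some sz))[m]? = none := by
          rw [List.getElem?_eq_none]; simp; omega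
        split_ifs <;> simp_all
    · have hnat : j.toNat ≠ m := by omega
      rw [List.getElem?_set_ne hnat]
      simp only [List.length_set, List.mem_cons]
      have hiff : ((m : Int) = j ∨ (m : Int) ∈ rest) ↔ (m : Int) ∈ rest :=
        or_iff_right (fun h => hjm h.symm)
      simp only [hiff]

-- the stat pass: what ends up in cell i.toNat, for a slot i owned by key k only
lemma pvBFill_getElem? (s : List (Int × Int × String × String × Int))
    (slots : List (Option Int)) (want : PySem.Dict (Int × String) (List Int))
    (i : Int) (k : Int × String) (hi : 0 ≤ i)
    (hpos : ∀ k' j, j ∈ want.getD k' [] → 0 ≤ j)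
    (hown : ∀ k', k' ≠ k → i ∉ want.getD k' []) :
    ((pvBFill s slots want).1)[i.toNat]? =
      if i ∈ want.getD k [] then (slots[i.toNat]?).map (fun v => (pvAFind k.1 k.2 s).or v)
      else slots[i.toNat]? := by
  induction s generalizing slots want with
  | nil =>
    simp only [pvBFill, pvAFind, Option.none_or]
    split_ifs <;> simp
  | cons u rest ih =>
    obtain ⟨spid, st, sc, fp, sz⟩ := u
    by_cases hk : k = (spid, fp)
    · -- the stat's key IS k
      have hcond : (fp == k.2 && spid == k.1) = true := by subst hk; simp
      rcases hget : want.get? (spid, fp) with _ | idxs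
      · -- key absent from want: k has no pending slots at all
        have hgd : want.getD k [] = [] := by
          rw [hk, PySem.Dict.getD_eq_get?_getD, hget]; rfl
        simp only [pvBFill, hget]
        rw [ih slots want hpos hown, hgd]
        simp
      · -- key present: every pending slot of k is written with sz, then k is popped
        have hidxs : want.getD (spid, fp) [] = idxs := PySem.Dict.getD_of_get?_eq_some want [] hget
        have hpos' : ∀ j ∈ idxs, 0 ≤ j := fun j hj => hpos (spid, fp) j (hidxs ▸ hj)
        simp only [pvBFill, hget]
        rw [ih _ _ (fun k' j hj => hpos k' j (pvMem_getD_erase want (spid, fp) k' j hj))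
            (fun k' hk' hmem => hown k' hk' (pvMem_getD_erase want (spid, fp) k' _ hmem))]
        rw [hk, pvGetD_erase_self]
        simp only [List.not_mem_nil, if_false]
        rw [pvSetMany_getElem? idxs sz slots i.toNat hpos']
        have hik : (↑i.toNat : Int) = i := Int.toNat_of_nonneg hi
        rw [hik, ← hk]
        have hgd : want.getD k [] = idxs := by rw [hk]; exact hidxs
        rw [hgd]
        simp only [pvAFind]
        by_cases hmem : i ∈ idxs
        · by_cases hlt : i.toNat < slots.length
          · rw [List.getElem?_eq_getElem hlt]; simp [hmem, hlt]
          · simp [hmem, hlt]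
        · simp [hmem]
    · -- the stat's key is NOT k : slot i is untouched by this step
      have hcond : (fp == k.2 && spid == k.1) = false := by
        rcases hb : (fp == k.2 && spid == k.1) with _ | _
        · rfl
        · exfalso; simp at hb
          exact hk (by obtain ⟨h1, h2⟩ := hb; obtain ⟨k1, k2⟩ := k; simp_all)
      have hfind : pvAFind k.1 k.2 ((spid, st, sc, fp, sz) :: rest) = pvAFind k.1 k.2 rest := by
        simp [pvAFind, hcond]
      rcases hget : want.get? (spid, fp) with _ | idxs
      · simp only [pvBFill, hget]
        rw [ih slots want hpos hown, hfind]
      · have hidxs : want.getD (spid, fp) [] = idxs := PySem.Dict.getD_of_get?_eq_some want [] hget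
        have hpos' : ∀ j ∈ idxs, 0 ≤ j := fun j hj => hpos (spid, fp) j (hidxs ▸ hj)
        have hnotmem : i ∉ idxs := fun hmem => hown (spid, fp) (fun h => hk h.symm) (hidxs ▸ hmem)
        simp only [pvBFill, hget]
        rw [ih _ _ (fun k' j hj => hpos k' j (pvMem_getD_erase want (spid, fp) k' j hj))
            (fun k' hk' hmem => hown k' hk' (pvMem_getD_erase want (spid, fp) k' _ hmem))]
        have hsame : (want.erase (spid, fp)).getD k [] = want.getD k [] :=
          pvGetD_erase_of_ne want (spid, fp) k hk
        have hslots : (idxs.foldl (fun sl i => sl.set i.toNat (some sz)) slots)[i.toNat]? = slots[i.toNat]? := by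
          rw [pvSetMany_getElem? idxs sz slots i.toNat hpos']
          have hik : (↑i.toNat : Int) = i := Int.toNat_of_nonneg hi
          rw [hik]
          simp [hnotmem]
        rw [hsame, hslots, hfind]

-- the rename-indexing pass, characterised
lemma pvBWant_getD (r : List (Int × Int × String × String)) (k : Int × String) :
    (pvBWant r).getD k []
      = ((PySem.List.enumerate r 0).filter (fun p => (p.2.1, p.2.2.2.1) == k)).map (fun p => p.1) := by
  unfold pvBWant
  have hbody : (fun (want : PySem.Dict (Int × String) (List Int)) (p : Int × Int × Int × String × String) =>
      match p with
      | (i, (pid, _, old_path, _)) => want.modify (pid, old_path) [] (· ++ [i]))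
      = fun want p => want.modify (p.2.1, p.2.2.2.1) [] (· ++ [p.1]) := by
    funext want p
    obtain ⟨i, pid, t, op, np⟩ := p
    rfl
  rw [hbody]
  have hmap : (PySem.List.enumerate r 0).foldl
        (fun (want : PySem.Dict (Int × String) (List Int)) p => want.modify (p.2.1, p.2.2.2.1) [] (· ++ [p.1]))
        PySem.Dict.empty
      = ((PySem.List.enumerate r 0).map (fun p => ((p.2.1, p.2.2.2.1), p.1))).foldl
        (fun want q => want.modify q.1 [] (· ++ [q.2])) PySem.Dict.empty := by
    rw [List.foldl_map]
  rw [hmap, PySem.Dict.getD_foldl_modify_append]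
  simp [List.filter_map, Function.comp_def, List.map_map]

-- final slots: cell n holds exactly what A's inner scan finds for rename n
lemma pvSlots_final (r : List (Int × Int × String × String))
    (s : List (Int × Int × String × String × Int)) (n : Nat) (hn : n < r.length) :
    ((pvBFill s (List.replicate r.length none) (pvBWant r)).1)[n]? =
      some (pvAFind (r[n].1) (r[n].2.2.1) s) := by
  have hkey : ∀ (k' : Int × String) (j : Int), j ∈ (pvBWant r).getD k' [] →
      0 ≤ j ∧ ∃ (m : Nat) (hm : m < r.length), j = (m : Int) ∧ (r[m].1, r[m].2.2.1) = k' := by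
    intro k' j hj
    rw [pvBWant_getD] at hj
    simp only [List.mem_map, List.mem_filter] at hj
    obtain ⟨p, ⟨hpmem, hpk⟩, hpj⟩ := hj
    rw [PySem.List.mem_enumerate_iff] at hpmem
    obtain ⟨m, hm, rfl⟩ := hpmem
    simp only [beq_iff_eq] at hpk
    refine ⟨by simp [← hpj], m, hm, by simp [← hpj], hpk⟩
  have h0 : (0 : Int) ≤ (n : Int) := by positivity
  have hmain := pvBFill_getElem? s (List.replicate r.length none) (pvBWant r) (n : Int)
      (r[n].1, r[n].2.2.1) h0
      (fun k' j hj => (hkey k' j hj).1)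
      (fun k' hk' hmem => by
        obtain ⟨-, m, hm, hjm, hkm⟩ := hkey k' (n : Int) hmem
        have hmn : m = n := by omega
        subst hmn
        exact hk' hkm.symm)
  rw [Int.toNat_natCast] at hmain
  rw [hmain]
  have hmem : (n : Int) ∈ (pvBWant r).getD (r[n].1, r[n].2.2.1) [] := by
    rw [pvBWant_getD]
    simp only [List.mem_map, List.mem_filter]
    exact ⟨((n : Int), r[n]), ⟨by rw [PySem.List.mem_enumerate_iff]; exact ⟨n, hn, by simp⟩, by simp⟩, rfl⟩
  rw [if_pos hmem]
  simp [hn]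

-- ===== VERDICT (by name: the statement is the Claim_ definition above) =====
theorem calculate_data_amount_spec : Claim_equal_calculate_data_amount := by
  intro r s _
  unfold Spec_calculate_data_amount
  have halt : calculate_data_amount_alt r s
      = (PySem.List.enumerate r 0).foldl
        (fun acc p =>
          match p with
          | (i, (pid, time, old_path, new_path)) =>
            match PySem.List.pyGetD ((pvBFill s (List.replicate r.length none) (pvBWant r)).1) i none with
            | some size => acc ++ [(pid, time, old_path, new_path, size)]
            | none => acc) [] := rfl
  rw [halt]
  rw [PySem.List.foldl_congr_mem (PySem.List.enumerate r 0) _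
    (fun acc p =>
      match pvAFind p.2.1 p.2.2.2.1 s with
      | some file_size => acc ++ [(p.2.1, p.2.2.1, p.2.2.2.1, p.2.2.2.2, file_size)]
      | none => acc) []
    (by
      intro acc p hp
      rw [PySem.List.mem_enumerate_iff] at hp
      obtain ⟨m, hm, rfl⟩ := hp
      have hget : PySem.List.pyGetD ((pvBFill s (List.replicate r.length none) (pvBWant r)).1)
          ((0 : Int) + (m : Int)) none = pvAFind (r[m].1) (r[m].2.2.1) s := by
        rw [zero_add, PySem.List.pyGetD_natCast, List.getD_eq_getElem?_getD, pvSlots_final r s m hm]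
        rfl
      rcases hrm : r[m] with ⟨pid, t, op, np⟩
      rw [hrm] at hget
      simp only [hget])]
  unfold calculate_data_amount
  have hsnd : r.foldl
      (fun data_amounts t =>
        match t with
        | (pid, time, old_path, new_path) =>
          match pvAFind pid old_path s with
          | some file_size => data_amounts ++ [(pid, time, old_path, new_path, file_size)]
          | none => data_amounts) []
      = ((PySem.List.enumerate r 0).map (fun p => p.2)).foldl
      (fun data_amounts t =>
        match t with
        | (pid, time, old_path, new_path) =>
          match pvAFind pid old_path s with
          | some file_size => data_amounts ++ [(pid, time, old_path, new_path, file_size)]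
          | none => data_amounts) [] := by
    rw [PySem.List.map_snd_enumerate]
  rw [hsnd, List.foldl_map]
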